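-- pv_equiv track=rewrite | github.com/sanromarth/tnpc-portal | remove_comments.py | remove_js_comments
-- ===== SOURCE A (Python) =====
-- def remove_js_comments(code):
--     """Remove single-line (//) and multi-line (/* */) comments from JS, preserving URLs."""
--     result = []
--     i = 0
--     in_single_quote = False
--     in_double_quote = False
--     in_template = False
--
--     while i < len(code):
--         # Handle string literals
--         if code[i] == "'" and not in_double_quote and not in_template:
--             in_single_quote = not in_single_quote
--             result.append(code[i])
--             i += 1
--         elif code[i] == '"' and not in_single_quote and not in_template:
--             in_double_quote = not in_double_quote
--             result.append(code[i])
--             i += 1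
--         elif code[i] == '`' and not in_single_quote and not in_double_quote:
--             in_template = not in_template
--             result.append(code[i])
--             i += 1
--         elif code[i] == '\\' and (in_single_quote or in_double_quote or in_template):
--             # Escape character inside string
--             result.append(code[i])
--             if i + 1 < len(code):
--                 result.append(code[i+1])
--                 i += 2
--             else:
--                 i += 1
--         elif not in_single_quote and not in_double_quote and not in_template:
--             # Check for single-line comment
--             if code[i:i+2] == '//':
--                 # Skip to end of line
--                 while i < len(code) and code[i] != '\n':
--                     i += 1
--             # Check for multi-line comment
--             elif code[i:i+2] == '/*':
--                 end = code.find('*/', i + 2)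
--                 if end != -1:
--                     # Count newlines in the comment to preserve line structure
--                     comment = code[i:end+2]
--                     newlines = comment.count('\n')
--                     result.append('\n' * newlines)
--                     i = end + 2
--                 else:
--                     i += 2
--             else:
--                 result.append(code[i])
--                 i += 1
--         else:
--             result.append(code[i])
--             i += 1
--
--     return ''.join(result)
-- ===== SOURCE B (Python) =====
-- def remove_js_comments(code):
--     """Remove // and /* */ comments from JS via a lexeme-at-a-time tokenizer (no persistent mode flags)."""
--     out = []
--     i, n = 0, len(code)
--     while i < n:
--         c = code[i]
--         if c == "'" or c == '"' or c == '`':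
--             # consume a whole string literal (possibly unterminated) in one go
--             j, buf = i + 1, [c]
--             while j < n:
--                 d = code[j]
--                 if d == '\\':
--                     if j + 1 < n:
--                         buf.append(code[j:j + 2])
--                         j += 2
--                     else:
--                         break  # lone trailing backslash is not part of the lexeme
--                 elif d == c:
--                     buf.append(d)
--                     j += 1
--                     break
--                 else:
--                     buf.append(d)
--                     j += 1
--             out.append(''.join(buf))
--             i = j
--         elif code.startswith('//', i):
--             nl = code.find('\n', i)
--             i = n if nl == -1 else nl
--         elif code.startswith('/*', i):
--             j, nls = i + 2, 0
--             while j < n and not code.startswith('*/', j):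
--                 nls += code[j] == '\n'
--                 j += 1
--             if code.startswith('*/', j):
--                 out.append('\n' * nls)
--                 i = j + 2
--             else:
--                 i += 2  # unterminated opener is dropped; rest rescanned
--         else:
--             out.append(c)
--             i += 1
--     return ''.join(out)
-- ===== Notes on version B (the rewrite author's own statement) =====
-- stated objective: alternative
-- what changed: A's character-by-character state machine with three persistent in-string boolean flags is replaced by a tokenizer that consumes each string literal (and each comment) as one whole lexeme with no cross-iteration mode state.
import Mathlib
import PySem

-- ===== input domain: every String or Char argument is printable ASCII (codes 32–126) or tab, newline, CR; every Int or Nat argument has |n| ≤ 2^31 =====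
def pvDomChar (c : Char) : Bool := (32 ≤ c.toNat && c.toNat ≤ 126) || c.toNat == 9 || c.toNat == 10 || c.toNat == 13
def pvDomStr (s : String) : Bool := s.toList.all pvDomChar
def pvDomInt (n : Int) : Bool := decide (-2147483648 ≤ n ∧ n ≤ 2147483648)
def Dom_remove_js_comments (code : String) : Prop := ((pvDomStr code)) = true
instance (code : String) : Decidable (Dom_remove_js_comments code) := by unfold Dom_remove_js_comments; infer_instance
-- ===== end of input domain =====

-- B replaces A's character-by-character state machine (three persistent in-string flags)
-- by a tokenizer that consumes each string literal / comment as one whole lexeme; objective: alternative.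

-- ===== PORT A =====

-- Python's inner `while i < len(code) and code[i] != '\n': i += 1`
def pvSkipLine : List Char → List Char
  | [] => []
  | c :: r => if c = '\n' then c :: r else pvSkipLine r

theorem pvSkipLine_length_le (l : List Char) : (pvSkipLine l).length ≤ l.length := by
  induction l with
  | nil => simp [pvSkipLine]
  | cons c r ih => simp only [pvSkipLine]; split <;> simp <;> omega

-- Python's `end = code.find('*/', i+2)`: splits the tail at the first '*/',
-- returning (characters before it, characters after it); none = not found (-1).
def pvFindClose : List Char → Option (List Char × List Char)
  | [] => none
  | c :: r =>
    if c = '*' ∧ r.head? = some '/' then some ([], r.tail)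
    else (pvFindClose r).map (fun p => (c :: p.1, p.2))

theorem pvFindClose_length_le (l : List Char) {a b : List Char}
    (h : pvFindClose l = some (a, b)) : b.length ≤ l.length := by
  induction l generalizing a b with
  | nil => simp [pvFindClose] at h
  | cons c r ih =>
      rw [pvFindClose] at h
      split at h
      · simp only [Option.some.injEq, Prod.mk.injEq] at h
        have : r.tail.length ≤ r.length := by simp
        simp [← h.2]; omega
      · simp only [Option.map_eq_some_iff] at h
        obtain ⟨p, hp, he⟩ := h
        cases he
        have := ih (a := p.1) (b := p.2) hp
        simp; omega

-- the main character loop of A, state = the three booleans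
def pvLoopA : List Char → Bool → Bool → Bool → List Char
  | [], _, _, _ => []
  | c :: rest, s, d, t =>
    if c = '\'' ∧ !d ∧ !t then c :: pvLoopA rest (!s) d t
    else if c = '"' ∧ !s ∧ !t then c :: pvLoopA rest s (!d) t
    else if c = '`' ∧ !s ∧ !d then c :: pvLoopA rest s d (!t)
    else if c = '\\' ∧ (s || d || t) then
      match rest with
      | c2 :: rest2 => c :: c2 :: pvLoopA rest2 s d t
      | [] => [c]
    else if !s ∧ !d ∧ !t then
      if c = '/' ∧ rest.head? = some '/' then
        -- the skipped '//' starts with '/' ≠ '\n', so Python's while advances past it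
        pvLoopA (pvSkipLine rest) s d t
      else if c = '/' ∧ rest.head? = some '*' then
        match h : pvFindClose rest.tail with
        | some (inside, after) =>
            List.replicate (inside.count '\n') '\n' ++ pvLoopA after s d t
        | none => pvLoopA rest.tail s d t
      else c :: pvLoopA rest s d t
    else c :: pvLoopA rest s d t
termination_by l _ _ _ => l.length
decreasing_by
  all_goals simp_all
  all_goals first
    | (have := pvSkipLine_length_le rest; omega)
    | (have h1 := pvFindClose_length_le rest.tail h
       have h2 : rest.tail.length ≤ rest.length := by simp
       omega)
    | (have : rest.tail.length ≤ rest.length := by simp; omega)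

def remove_js_comments (code : String) : String :=
  String.mk (pvLoopA code.toList false false false)

-- ===== PORT B =====

-- consume one whole string literal opened by quote q: returns (lexeme body incl.
-- closing quote if present, rest of input); a lone trailing '\' is left unconsumed
def pvTakeStr (q : Char) : List Char → List Char × List Char
  | [] => ([], [])
  | c :: r =>
    if c = '\\' then
      match r with
      | c2 :: r2 => (c :: c2 :: (pvTakeStr q r2).1, (pvTakeStr q r2).2)
      | [] => ([], [c])
    else if c = q then ([c], r)
    else (c :: (pvTakeStr q r).1, (pvTakeStr q r).2)

theorem pvTakeStr_length_le (q : Char) (l : List Char) : (pvTakeStr q l).2.length ≤ l.length := by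
  fun_induction pvTakeStr q l <;> simp_all <;> omega

-- consume a block comment body up to '*/': (newline count, rest); none = unterminated
def pvMatchBlock : List Char → Option (Nat × List Char)
  | [] => none
  | c :: r =>
    if c = '*' ∧ r.head? = some '/' then some (0, r.tail)
    else (pvMatchBlock r).map (fun p => (if c = '\n' then p.1 + 1 else p.1, p.2))

theorem pvMatchBlock_length_le (l : List Char) {n : Nat} {b : List Char}
    (h : pvMatchBlock l = some (n, b)) : b.length ≤ l.length := by
  induction l generalizing n b with
  | nil => simp [pvMatchBlock] at h
  | cons c r ih =>
      rw [pvMatchBlock] at h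
      split at h
      · simp only [Option.some.injEq, Prod.mk.injEq] at h
        have : r.tail.length ≤ r.length := by simp
        simp [← h.2]; omega
      · simp only [Option.map_eq_some_iff] at h
        obtain ⟨p, hp, he⟩ := h
        cases he
        have := ih (n := p.1) (b := p.2) hp
        simp; omega

-- the lexeme loop of B
def pvLoopB : List Char → List Char
  | [] => []
  | c :: rest =>
    if c = '\'' ∨ c = '"' ∨ c = '`' then
      c :: ((pvTakeStr c rest).1 ++ pvLoopB (pvTakeStr c rest).2)
    else if c = '/' ∧ rest.head? = some '/' then
      pvLoopB (rest.dropWhile (· ≠ '\n'))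
    else if c = '/' ∧ rest.head? = some '*' then
      match h : pvMatchBlock rest.tail with
      | some (nls, after) => List.replicate nls '\n' ++ pvLoopB after
      | none => pvLoopB rest.tail
    else c :: pvLoopB rest
termination_by l => l.length
decreasing_by
  all_goals simp_all
  all_goals first
    | (have := pvTakeStr_length_le c rest; omega)
    | (exact List.length_dropWhile_le _ rest)
    | (have h1 := pvMatchBlock_length_le rest.tail h
       have h2 : rest.tail.length ≤ rest.length := by simp
       omega)
    | (have : rest.tail.length ≤ rest.length := by simp; omega)

def remove_js_comments_alt (code : String) : String :=
  String.mk (pvLoopB code.toList)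

-- ===== PRECONDITION & SPEC =====
def Spec_remove_js_comments (code : String) (out : String) : Prop := out = remove_js_comments_alt code
instance (code : String) (out : String) : Decidable (Spec_remove_js_comments code out) := by unfold Spec_remove_js_comments; infer_instance

-- ===== CLAIM (what is proved, stated in full; the proofs are below) =====
def Claim_equal_remove_js_comments : Prop := ∀ (code : String), Dom_remove_js_comments code → Spec_remove_js_comments code (remove_js_comments code)

-- ===== LEMMAS AND PROOFS =====

theorem pvSkipLine_eq_dropWhile (l : List Char) : pvSkipLine l = l.dropWhile (· ≠ '\n') := by
  induction l with
  | nil => rfl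
  | cons c r ih => simp only [pvSkipLine, List.dropWhile]; split <;> simp_all

theorem pvMatchBlock_eq (l : List Char) :
    pvMatchBlock l = (pvFindClose l).map (fun p => (p.1.count '\n', p.2)) := by
  induction l with
  | nil => rfl
  | cons c r ih =>
      rw [pvMatchBlock, pvFindClose]
      split
      · simp
      · rw [ih]
        cases pvFindClose r with
        | none => rfl
        | some p => simp [List.count_cons]; split <;> simp

theorem pvMain : ∀ (n : Nat) (l : List Char), l.length ≤ n →
    (pvLoopA l false false false = pvLoopB l)
    ∧ (pvLoopA l true false false = (pvTakeStr '\'' l).1 ++ pvLoopB (pvTakeStr '\'' l).2)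
    ∧ (pvLoopA l false true false = (pvTakeStr '"' l).1 ++ pvLoopB (pvTakeStr '"' l).2)
    ∧ (pvLoopA l false false true = (pvTakeStr '`' l).1 ++ pvLoopB (pvTakeStr '`' l).2) := by
  intro n
  induction n with
  | zero =>
      intro l hl
      have hnil : l = [] := List.eq_nil_of_length_eq_zero (Nat.le_zero.mp hl)
      subst hnil
      refine ⟨?_, ?_, ?_, ?_⟩ <;> simp [pvLoopA, pvLoopB, pvTakeStr]
  | succ n IH =>
      intro l hl
      rcases l with _ | ⟨c, r⟩
      · refine ⟨?_, ?_, ?_, ?_⟩ <;> simp [pvLoopA, pvLoopB, pvTakeStr]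
      · have hr : r.length ≤ n := by simpa using hl
        have htail : r.tail.length ≤ n := le_trans (by simp) hr
        refine ⟨?_, ?_, ?_, ?_⟩
        -- mode: outside any string
        · by_cases hq : c = '\'' ∨ c = '"' ∨ c = '`'
          · rcases hq with rfl | rfl | rfl <;>
              · rw [pvLoopA.eq_def, pvLoopB.eq_def]
                simp only [reduceIte, Char.reduceEq, true_and, and_true,
                  false_and, and_false, Bool.not_false, Bool.not_true, Bool.or_self,
                  Bool.false_eq_true, Bool.true_eq_false, true_or, or_true, or_false, false_or]
                first
                  | exact congrArg _ (IH r hr).2.1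
                  | exact congrArg _ (IH r hr).2.2.1
                  | exact congrArg _ (IH r hr).2.2.2
          · push_neg at hq
            obtain ⟨hq1, hq2, hq3⟩ := hq
            by_cases hsl : c = '/' ∧ r.head? = some '/'
            · obtain ⟨rfl, hh⟩ := hsl
              rw [pvLoopA.eq_def, pvLoopB.eq_def]
              simp only [Char.reduceEq, false_and, reduceIte, hh, and_self, Bool.not_false,
                and_true, true_and]
              rw [pvSkipLine_eq_dropWhile]
              exact (IH _ (le_trans (List.length_dropWhile_le _ r) hr)).1
            · by_cases hbl : c = '/' ∧ r.head? = some '*'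
              · obtain ⟨rfl, hh⟩ := hbl
                rw [pvLoopA.eq_def, pvLoopB.eq_def]
                simp only [Char.reduceEq, false_and, reduceIte, hh, and_self, Bool.not_false,
                  and_true, true_and, reduceCtorEq, Option.some.injEq, and_false]
                rw [pvMatchBlock_eq]
                cases hfc : pvFindClose r.tail with
                | none => simpa using (IH r.tail htail).1
                | some p =>
                    have hlen : p.2.length ≤ n := le_trans (pvFindClose_length_le r.tail hfc) htail
                    simpa using congrArg (List.replicate (p.1.count '\n') '\n' ++ ·) (IH p.2 hlen).1
              · rw [pvLoopA.eq_def, pvLoopB.eq_def]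
                simp only [hq1, hq2, hq3, Char.reduceEq, false_and, reduceIte, Bool.not_false,
                  Bool.or_self, Bool.false_eq_true, and_false, and_true, true_and, or_self,
                  false_or, or_false]
                rw [if_neg hsl, if_neg hsl, if_neg hbl, if_neg hbl]
                exact congrArg _ (IH r hr).1
        -- modes: inside a '\''-, '"'- or '`'-quoted string
        · by_cases h1 : c = '\''
          · subst h1
            rw [pvLoopA.eq_def, pvTakeStr.eq_def]
            simp only [Char.reduceEq, Bool.not_true, Bool.not_false, and_true, true_and,
              and_false, false_and, reduceIte, and_self, Bool.or_self, Bool.true_or,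
              Bool.false_eq_true, Bool.true_eq_false, List.cons_append, List.nil_append]
            exact congrArg _ (IH r hr).1
          · by_cases h2 : c = '\\'
            · subst h2
              rcases r with _ | ⟨c2, r2⟩
              · simp [pvLoopA, pvLoopB, pvTakeStr]
              · have hr2 : r2.length ≤ n := by simp at hr; omega
                rw [pvLoopA.eq_def, pvTakeStr.eq_def]
                simp only [Char.reduceEq, Bool.not_true, Bool.not_false, and_true, true_and,
                  and_false, false_and, reduceIte, and_self, Bool.or_self, Bool.true_or,
                  Bool.or_true, Bool.false_or, Bool.false_eq_true, Bool.true_eq_false, List.cons_append, List.nil_append]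
                exact congrArg _ (congrArg _ (IH r2 hr2).2.1)
            · rw [pvLoopA.eq_def, pvTakeStr.eq_def]
              simp only [h1, h2, Char.reduceEq, Bool.not_true, Bool.not_false, and_true,
                true_and, and_false, false_and, reduceIte, and_self, Bool.or_self,
                Bool.true_or, Bool.or_true, Bool.false_or, Bool.false_eq_true, Bool.true_eq_false, List.cons_append, List.nil_append]
              exact congrArg _ (IH r hr).2.1
        · by_cases h1 : c = '"'
          · subst h1
            rw [pvLoopA.eq_def, pvTakeStr.eq_def]
            simp only [Char.reduceEq, Bool.not_true, Bool.not_false, and_true, true_and,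
              and_false, false_and, reduceIte, and_self, Bool.or_self, Bool.true_or,
              Bool.false_eq_true, Bool.true_eq_false, List.cons_append, List.nil_append]
            exact congrArg _ (IH r hr).1
          · by_cases h2 : c = '\\'
            · subst h2
              rcases r with _ | ⟨c2, r2⟩
              · simp [pvLoopA, pvLoopB, pvTakeStr]
              · have hr2 : r2.length ≤ n := by simp at hr; omega
                rw [pvLoopA.eq_def, pvTakeStr.eq_def]
                simp only [Char.reduceEq, Bool.not_true, Bool.not_false, and_true, true_and,
                  and_false, false_and, reduceIte, and_self, Bool.or_self, Bool.true_or,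
                  Bool.or_true, Bool.false_or, Bool.false_eq_true, Bool.true_eq_false, List.cons_append, List.nil_append]
                exact congrArg _ (congrArg _ (IH r2 hr2).2.2.1)
            · rw [pvLoopA.eq_def, pvTakeStr.eq_def]
              simp only [h1, h2, Char.reduceEq, Bool.not_true, Bool.not_false, and_true,
                true_and, and_false, false_and, reduceIte, and_self, Bool.or_self,
                Bool.true_or, Bool.or_true, Bool.false_or, Bool.false_eq_true, Bool.true_eq_false, List.cons_append, List.nil_append]
              exact congrArg _ (IH r hr).2.2.1
        · by_cases h1 : c = '`'
          · subst h1
            rw [pvLoopA.eq_def, pvTakeStr.eq_def]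
            simp only [Char.reduceEq, Bool.not_true, Bool.not_false, and_true, true_and,
              and_false, false_and, reduceIte, and_self, Bool.or_self, Bool.true_or,
              Bool.false_eq_true, Bool.true_eq_false, List.cons_append, List.nil_append]
            exact congrArg _ (IH r hr).1
          · by_cases h2 : c = '\\'
            · subst h2
              rcases r with _ | ⟨c2, r2⟩
              · simp [pvLoopA, pvLoopB, pvTakeStr]
              · have hr2 : r2.length ≤ n := by simp at hr; omega
                rw [pvLoopA.eq_def, pvTakeStr.eq_def]
                simp only [Char.reduceEq, Bool.not_true, Bool.not_false, and_true, true_and,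
                  and_false, false_and, reduceIte, and_self, Bool.or_self, Bool.true_or,
                  Bool.or_true, Bool.false_or, Bool.false_eq_true, Bool.true_eq_false, List.cons_append, List.nil_append]
                exact congrArg _ (congrArg _ (IH r2 hr2).2.2.2)
            · rw [pvLoopA.eq_def, pvTakeStr.eq_def]
              simp only [h1, h2, Char.reduceEq, Bool.not_true, Bool.not_false, and_true,
                true_and, and_false, false_and, reduceIte, and_self, Bool.or_self,
                Bool.true_or, Bool.or_true, Bool.false_or, Bool.false_eq_true, Bool.true_eq_false, List.cons_append, List.nil_append]
              exact congrArg _ (IH r hr).2.2.2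

-- ===== VERDICT (by name: the statement is the Claim_ definition above) =====
theorem remove_js_comments_spec : Claim_equal_remove_js_comments := by
  intro code _
  unfold Spec_remove_js_comments remove_js_comments remove_js_comments_alt
  exact congrArg String.mk ((pvMain code.toList.length code.toList le_rfl).1)
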